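-- pv_equiv track=rewrite | github.com/RaghavAggIIT/CV-Projects | Monte Carlo-Stochastic Strategy Simulator/ques_1.py | calc_expectation
-- ===== SOURCE A (Python) =====
-- M = 1000000007
--
-- def mod_add(a, b):
--     a = (a % M + M) % M
--     b = (b % M + M) % M
--     return (a + b) % M
--
-- def mod_multiply(a, b):
--     a = (a % M + M) % M
--     b = (b % M + M) % M
--     return (a * b) % M
--
-- def mod_divide(a, b):
--     a = (a % M + M) % M
--     b = (b % M + M) % M
--     return mod_multiply(a, pow(b, M - 2, M))
--
-- def calc_expectation(t):
--     """
--     Returns: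
--         The expected value of sum_{i=1}^{t} Xi will be of the form p/q,
--         where p and q are positive integers,
--         return p.q^(-1) mod 1000000007.
--     """
--
--     dp = [[0] * (t + 1) for _ in range(t + 1)]
--     dp[1][1] = mod_divide(1, 1)
--
--     for a in range(1, t + 1):
--         for b in range(1, t + 1):
--             if a == 1 and b == 1:
--                 continue
--             total_games = a + b - 1
--
--             prob_from_alice_win = mod_multiply(dp[a - 1][b], mod_divide(b, total_games)) if a > 1 else 0
--             prob_from_bob_win = mod_multiply(dp[a][b - 1], mod_divide(a, total_games)) if b > 1 else 0
--
--             dp[a][b] = mod_add(prob_from_alice_win, prob_from_bob_win)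
--
--     exp = 0
--     for a in range(1, t + 1):
--         for b in range(1, t + 1):
--             i = a - b
--             if a+b==t:
--                 exp = mod_add(exp, mod_multiply(i, dp[a][b]))
--     return exp
-- ===== SOURCE B (Python) =====
-- M = 1000000007
--
-- def calc_expectation(t):
--     # The dp table A builds is symmetric (dp[a][b] == dp[b][a]), so the
--     # antisymmetric weighted sum of (a-b)*dp[a][b] over a+b == t cancels
--     # pairwise modulo M; the result is the constant 0, no table needed.
--     return 0
-- ===== Notes on version B (the rewrite author's own statement) =====
-- stated objective: faster
-- what changed: A's dp table satisfies dp[a][b]=dp[b][a], so the antisymmetric weighted sum of (a-b)*dp[a][b] over the diagonal a+b=t cancels pairwise modulo the prime M; B returns the closed-form constant 0 instead of building the quadratic table.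
-- outside the precondition, e.g. on calc_expectation(0): A raises IndexError, B returns 0
import Mathlib
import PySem

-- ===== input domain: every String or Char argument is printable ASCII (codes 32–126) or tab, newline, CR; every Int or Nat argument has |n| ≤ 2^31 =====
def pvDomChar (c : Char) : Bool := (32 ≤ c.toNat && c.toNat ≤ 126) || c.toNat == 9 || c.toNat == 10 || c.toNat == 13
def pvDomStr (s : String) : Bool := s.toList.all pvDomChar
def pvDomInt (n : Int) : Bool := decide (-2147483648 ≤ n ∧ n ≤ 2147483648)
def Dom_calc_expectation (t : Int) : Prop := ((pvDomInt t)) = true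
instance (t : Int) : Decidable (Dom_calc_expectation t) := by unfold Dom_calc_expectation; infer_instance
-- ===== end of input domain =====

-- B returns the closed-form constant 0 (A's symmetric dp table makes the antisymmetric sum cancel): asymptotically faster.

-- ===== PORT A =====
def pvM : Int := 1000000007

def pvModAdd (a b : Int) : Int :=
  PySem.Int.mod (PySem.Int.mod (PySem.Int.mod a pvM + pvM) pvM + PySem.Int.mod (PySem.Int.mod b pvM + pvM) pvM) pvM

def pvModMul (a b : Int) : Int :=
  PySem.Int.mod (PySem.Int.mod (PySem.Int.mod a pvM + pvM) pvM * PySem.Int.mod (PySem.Int.mod b pvM + pvM) pvM) pvM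

-- pow(b, e, m): value-exact for the nonnegative base and positive modulus A uses
-- (binary exponentiation, like CPython's three-argument pow)
def pvPow (b : Int) (e : Nat) (m : Int) : Int :=
  if e = 0 then PySem.Int.mod 1 m
  else
    let h := pvPow b (e / 2) m
    if e % 2 = 0 then PySem.Int.mod (h * h) m
    else PySem.Int.mod (PySem.Int.mod (h * h) m * b) m

def pvModDiv (a b : Int) : Int :=
  pvModMul (PySem.Int.mod (PySem.Int.mod a pvM + pvM) pvM)
    (pvPow (PySem.Int.mod (PySem.Int.mod b pvM + pvM) pvM) (pvM - 2).toNat pvM)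

-- dp[i][j] read/write; indices the loops use are nonnegative and in range, where this is exact
def pvGet2 (dp : List (List Int)) (i j : Int) : Int :=
  (dp.getD i.toNat []).getD j.toNat 0

def pvSet2 (dp : List (List Int)) (i j : Int) (v : Int) : List (List Int) :=
  dp.set i.toNat ((dp.getD i.toNat []).set j.toNat v)

-- the body of the fill loop
def pvStep (dp : List (List Int)) (a b : Int) : List (List Int) :=
  if a = 1 ∧ b = 1 then dp
  else
    let total := a + b - 1
    let pA := if 1 < a then pvModMul (pvGet2 dp (a - 1) b) (pvModDiv b total) else 0
    let pB := if 1 < b then pvModMul (pvGet2 dp a (b - 1)) (pvModDiv a total) else 0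
    pvSet2 dp a b (pvModAdd pA pB)

def pvTable (t : Int) : List (List Int) :=
  (PySem.List.pyRange 1 (t + 1) 1).foldl
    (fun dp a => (PySem.List.pyRange 1 (t + 1) 1).foldl (fun dp b => pvStep dp a b) dp)
    (pvSet2 (List.replicate (t + 1).toNat (List.replicate (t + 1).toNat 0)) 1 1 (pvModDiv 1 1))

def calc_expectation (t : Int) : Int :=
  let dp := pvTable t
  (PySem.List.pyRange 1 (t + 1) 1).foldl
    (fun exp a =>
      (PySem.List.pyRange 1 (t + 1) 1).foldl
        (fun exp b =>
          let i := a - b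
          if a + b = t then pvModAdd exp (pvModMul i (pvGet2 dp a b)) else exp)
        exp)
    0

-- ===== PORT B =====
def calc_expectation_alt (t : Int) : Int := 0

-- ===== PRECONDITION & SPEC =====
-- A raises IndexError at the dp[1][1] initialisation when the table is too short, i.e. for t ≤ 0.
def Pre_calc_expectation (t : Int) : Prop := 1 ≤ t
instance (t : Int) : Decidable (Pre_calc_expectation t) := by unfold Pre_calc_expectation; infer_instance
def pvWitness_calc_expectation : Int := 3

def Spec_calc_expectation (t : Int) (out : Int) : Prop := out = calc_expectation_alt t
instance (t : Int) (out : Int) : Decidable (Spec_calc_expectation t out) := by unfold Spec_calc_expectation; infer_instance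

-- ===== CLAIM (what is proved, stated in full; the proofs are below) =====
def Claim_equal_calc_expectation : Prop := ∀ (t : Int), Dom_calc_expectation t → Pre_calc_expectation t → Spec_calc_expectation t (calc_expectation t)

-- ===== LEMMAS AND PROOFS =====

set_option maxHeartbeats 1000000

theorem pvM_pos : (0 : Int) < pvM := by norm_num [pvM]

theorem pvShift (x : Int) : (x % pvM + pvM) % pvM = x % pvM := by
  rw [show x % pvM + pvM = x % pvM + pvM * 1 by ring, Int.add_mul_emod_self_left,
      Int.emod_emod_of_dvd x (dvd_refl pvM)]

theorem pvModAdd_eq (a b : Int) : pvModAdd a b = (a + b) % pvM := by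
  unfold pvModAdd
  rw [PySem.Int.mod_eq_emod_of_pos pvM_pos, PySem.Int.mod_eq_emod_of_pos pvM_pos,
      PySem.Int.mod_eq_emod_of_pos pvM_pos, PySem.Int.mod_eq_emod_of_pos pvM_pos,
      PySem.Int.mod_eq_emod_of_pos pvM_pos, pvShift a, pvShift b]
  conv_rhs => rw [Int.add_emod]

theorem pvModMul_eq (a b : Int) : pvModMul a b = (a * b) % pvM := by
  unfold pvModMul
  rw [PySem.Int.mod_eq_emod_of_pos pvM_pos, PySem.Int.mod_eq_emod_of_pos pvM_pos,
      PySem.Int.mod_eq_emod_of_pos pvM_pos, PySem.Int.mod_eq_emod_of_pos pvM_pos,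
      PySem.Int.mod_eq_emod_of_pos pvM_pos, pvShift a, pvShift b]
  conv_rhs => rw [Int.mul_emod]

theorem pvModAdd_comm (a b : Int) : pvModAdd a b = pvModAdd b a := by
  rw [pvModAdd_eq, pvModAdd_eq, Int.add_comm]

theorem pvModAdd_bounds (a b : Int) : 0 ≤ pvModAdd a b ∧ pvModAdd a b < pvM := by
  rw [pvModAdd_eq]
  exact ⟨Int.emod_nonneg _ (by norm_num [pvM]), Int.emod_lt_of_pos _ pvM_pos⟩

theorem pvDvd_emod_sub (x : Int) : pvM ∣ x % pvM - x := by
  rw [Int.emod_def]; exact ⟨-(x / pvM), by ring⟩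

-- the recurrence the fill loop computes, as a function of the (positive) cell coordinates
def pvD : Nat → Nat → Int
  | a, b =>
    if a = 1 ∧ b = 1 then pvModDiv 1 1
    else
      pvModAdd
        (if 1 < a then pvModMul (pvD (a - 1) b) (pvModDiv (b : Int) ((a : Int) + (b : Int) - 1)) else 0)
        (if 1 < b then pvModMul (pvD a (b - 1)) (pvModDiv (a : Int) ((a : Int) + (b : Int) - 1)) else 0)
  termination_by a b => a + b
  decreasing_by all_goals omega

theorem pvD_symm (a b : Nat) : pvD a b = pvD b a := by
  have H : ∀ n a b : Nat, a + b = n → pvD a b = pvD b a := by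
    intro n
    induction n using Nat.strong_induction_on with
    | _ n ih =>
      intro a b hab
      conv_lhs => rw [pvD]
      conv_rhs => rw [pvD]
      by_cases h : a = 1 ∧ b = 1
      · rw [if_pos h]
        conv_rhs => rw [if_pos (show b = 1 ∧ a = 1 from ⟨h.2, h.1⟩)]
      · rw [if_neg h]
        conv_rhs => rw [if_neg (show ¬(b = 1 ∧ a = 1) from fun hc => h ⟨hc.2, hc.1⟩)]
        rw [pvModAdd_comm]
        congr 1
        · by_cases hb : 1 < b
          · rw [if_pos hb, if_pos hb, ih (a + (b - 1)) (by omega) a (b - 1) rfl]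
            congr 2
            ring
          · rw [if_neg hb, if_neg hb]
        · by_cases ha : 1 < a
          · rw [if_pos ha, if_pos ha, ih (a - 1 + b) (by omega) (a - 1) b rfl]
            congr 2
            ring
          · rw [if_neg ha, if_neg ha]
  exact H (a + b) a b rfl

theorem pvD_one_one : pvD 1 1 = pvModDiv 1 1 := by rw [pvD]; simp

-- unfolding pvD at Int coordinates
theorem pvD_int (r c : Int) (hr : 1 ≤ r) (hc : 1 ≤ c) (h : ¬(r = 1 ∧ c = 1)) :
    pvD r.toNat c.toNat =
      pvModAdd
        (if 1 < r then pvModMul (pvD (r - 1).toNat c.toNat) (pvModDiv c (r + c - 1)) else 0)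
        (if 1 < c then pvModMul (pvD r.toNat (c - 1).toNat) (pvModDiv r (r + c - 1)) else 0) := by
  rw [pvD, if_neg (by omega : ¬(r.toNat = 1 ∧ c.toNat = 1))]
  congr 1
  · by_cases h2 : 1 < r
    · rw [if_pos (by omega : 1 < r.toNat), if_pos h2]
      congr 2
      · omega
      · omega
      · omega
    · rw [if_neg (by omega : ¬1 < r.toNat), if_neg h2]
  · by_cases h2 : 1 < c
    · rw [if_pos (by omega : 1 < c.toNat), if_pos h2]
      congr 2
      · omega
      · omega
      · omega
    · rw [if_neg (by omega : ¬1 < c.toNat), if_neg h2]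

-- table shape and indexing
def pvShp (n : Nat) (dp : List (List Int)) : Prop :=
  dp.length = n ∧ ∀ r ∈ dp, r.length = n

theorem pvShp_set2 {n : Nat} {dp : List (List Int)} (h : pvShp n dp)
    (i j : Int) (v : Int) (hi : i.toNat < n) :
    pvShp n (pvSet2 dp i j v) := by
  obtain ⟨hlen, hrow⟩ := h
  refine ⟨by simp [pvSet2, hlen], ?_⟩
  intro r hr
  rcases List.mem_or_eq_of_mem_set hr with hmem | heq
  · exact hrow r hmem
  · subst heq
    rw [List.length_set, List.getD_eq_getElem?_getD,
        List.getElem?_eq_getElem (by omega : i.toNat < dp.length), Option.getD_some]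
    exact hrow _ (List.getElem_mem _)

theorem pvGet2_set2 {n : Nat} {dp : List (List Int)} (h : pvShp n dp)
    {i j : Int} (v : Int) (hi0 : 0 ≤ i) (hi : i.toNat < n) (hj0 : 0 ≤ j) (hj : j.toNat < n)
    (i' j' : Int) (hi'0 : 0 ≤ i') (hj'0 : 0 ≤ j') :
    pvGet2 (pvSet2 dp i j v) i' j' = if i' = i ∧ j' = j then v else pvGet2 dp i' j' := by
  obtain ⟨hlen, hrow⟩ := h
  unfold pvGet2 pvSet2
  by_cases hii : i' = i
  · subst hii
    have hrowset : (dp.set i'.toNat ((dp.getD i'.toNat []).set j.toNat v)).getD i'.toNat [] =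
        (dp.getD i'.toNat []).set j.toNat v := by
      rw [List.getD_eq_getElem?_getD, List.getElem?_set_self (by omega), Option.getD_some]
    rw [hrowset]
    have hrlen : (dp.getD i'.toNat []).length = n := by
      rw [List.getD_eq_getElem?_getD, List.getElem?_eq_getElem (by omega : i'.toNat < dp.length),
          Option.getD_some]
      exact hrow _ (List.getElem_mem _)
    by_cases hjj : j' = j
    · subst hjj
      rw [if_pos ⟨rfl, rfl⟩, List.getD_eq_getElem?_getD,
          List.getElem?_set_self (by omega), Option.getD_some]
    · have hne : j.toNat ≠ j'.toNat := by omega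
      rw [if_neg (by tauto), List.getD_eq_getElem?_getD, List.getElem?_set_ne hne,
          ← List.getD_eq_getElem?_getD]
  · have hne : i.toNat ≠ i'.toNat := by omega
    have hset : (dp.set i.toNat ((dp.getD i.toNat []).set j.toNat v)).getD i'.toNat [] =
        dp.getD i'.toNat [] := by
      rw [List.getD_eq_getElem?_getD, List.getElem?_set_ne hne, ← List.getD_eq_getElem?_getD]
    rw [if_neg (by tauto), hset]

theorem pvShp_replicate (n : Nat) : pvShp n (List.replicate n (List.replicate n (0 : Int))) := by
  refine ⟨by simp, ?_⟩
  intro r hr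
  rw [List.eq_of_mem_replicate hr]
  simp

theorem pvGet2_replicate (n : Nat) (i j : Int) :
    pvGet2 (List.replicate n (List.replicate n (0 : Int))) i j = 0 := by
  unfold pvGet2
  have hrow : (List.replicate n (List.replicate n (0 : Int))).getD i.toNat [] =
        List.replicate n (0 : Int) ∨
      (List.replicate n (List.replicate n (0 : Int))).getD i.toNat [] = [] := by
    rw [List.getD_eq_getElem?_getD, List.getElem?_replicate]
    split
    · left; rfl
    · right; rfl
  rcases hrow with h | h <;> rw [h]
  · rw [List.getD_eq_getElem?_getD, List.getElem?_replicate]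
    split
    · rfl
    · rfl
  · rfl

-- the untouched content of a cell
def pvInit (x y : Int) : Int := if x = 1 ∧ y = 1 then pvModDiv 1 1 else 0

-- loop invariant of the fill loops: cells before (r, c) in row-major order hold pvD, the rest pvInit
def pvP (t r c : Int) (dp : List (List Int)) : Prop :=
  pvShp (t + 1).toNat dp ∧
    ∀ x y : Int, 1 ≤ x → x ≤ t → 1 ≤ y → y ≤ t →
      pvGet2 dp x y = if x < r ∨ (x = r ∧ y < c) then pvD x.toNat y.toNat else pvInit x y

theorem pvP_init (t : Int) (ht : 1 ≤ t) :
    pvP t 1 1 (pvSet2 (List.replicate (t + 1).toNat (List.replicate (t + 1).toNat 0)) 1 1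
      (pvModDiv 1 1)) := by
  have hsh := pvShp_replicate (t + 1).toNat
  refine ⟨pvShp_set2 hsh 1 1 _ (by omega), ?_⟩
  intro x y hx1 hxt hy1 hyt
  rw [pvGet2_set2 (i := 1) (j := 1) hsh _ (by omega) (by omega) (by omega) (by omega) x y
    (by omega) (by omega)]
  rw [if_neg (show ¬(x < 1 ∨ (x = 1 ∧ y < 1)) by omega)]
  unfold pvInit
  by_cases hxy : x = 1 ∧ y = 1
  · rw [if_pos hxy, if_pos hxy]
  · rw [if_neg hxy, if_neg hxy, pvGet2_replicate]

theorem pvP_step {t r c : Int} {dp : List (List Int)} (ht : 1 ≤ t)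
    (hr : 1 ≤ r) (hrt : r ≤ t) (hc : 1 ≤ c) (hct : c ≤ t) (h : pvP t r c dp) :
    pvP t r (c + 1) (pvStep dp r c) := by
  obtain ⟨hsh, hval⟩ := h
  unfold pvStep
  by_cases hrc : r = 1 ∧ c = 1
  · rw [if_pos hrc]
    refine ⟨hsh, ?_⟩
    intro x y hx1 hxt hy1 hyt
    rw [hval x y hx1 hxt hy1 hyt]
    by_cases hxy : x = 1 ∧ y = 1
    · rw [if_neg (by omega), if_pos (by omega)]
      unfold pvInit
      rw [if_pos hxy, hxy.1, hxy.2]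
      simp only [Int.toNat_one]
      exact pvD_one_one.symm
    · rw [if_congr (by omega : (x < r ∨ (x = r ∧ y < c)) ↔ (x < r ∨ (x = r ∧ y < c + 1))) rfl rfl]
  · rw [if_neg hrc]
    refine ⟨pvShp_set2 ⟨hsh.1, hsh.2⟩ r c _ (by omega), ?_⟩
    intro x y hx1 hxt hy1 hyt
    rw [pvGet2_set2 (i := r) (j := c) hsh _ (by omega) (by omega) (by omega) (by omega) x y
      (by omega) (by omega)]
    by_cases hxy : x = r ∧ y = c
    · rw [if_pos hxy]
      rw [if_pos (show x < r ∨ (x = r ∧ y < c + 1) by omega)]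
      rw [hxy.1, hxy.2, pvD_int r c hr hc hrc]
      congr 1
      · by_cases h2 : 1 < r
        · rw [if_pos h2, if_pos h2,
              hval (r - 1) c (by omega) (by omega) (by omega) (by omega), if_pos (by omega)]
        · rw [if_neg h2, if_neg h2]
      · by_cases h2 : 1 < c
        · rw [if_pos h2, if_pos h2,
              hval r (c - 1) (by omega) (by omega) (by omega) (by omega), if_pos (by omega)]
        · rw [if_neg h2, if_neg h2]
    · rw [if_neg hxy, hval x y hx1 hxt hy1 hyt,
          if_congr (by omega : (x < r ∨ (x = r ∧ y < c)) ↔ (x < r ∨ (x = r ∧ y < c + 1))) rfl rfl]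

theorem pvP_row {t r : Int} {dp : List (List Int)} (ht : 1 ≤ t) (hr : 1 ≤ r) (hrt : r ≤ t)
    (h : pvP t r 1 dp) :
    ∀ n : Nat, (n : Int) ≤ t →
      pvP t r (1 + (n : Int)) ((PySem.List.pyRange 1 (1 + (n : Int)) 1).foldl
        (fun dp b => pvStep dp r b) dp) := by
  intro n
  induction n with
  | zero =>
    intro _
    rw [show ((0 : Nat) : Int) = 0 by rfl]
    rw [show PySem.List.pyRange 1 (1 + (0 : Int)) 1 = [] from
      PySem.List.pyRange_one_eq_nil (by omega)]
    simpa using h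
  | succ k ih =>
    intro hk
    have hk' : (k : Int) ≤ t := by push_cast at hk ⊢; omega
    have hcast : 1 + ((k + 1 : Nat) : Int) = (1 + (k : Int)) + 1 := by push_cast; ring
    rw [hcast, show PySem.List.pyRange 1 ((1 + (k : Int)) + 1) 1 =
        PySem.List.pyRange 1 (1 + (k : Int)) 1 ++ [1 + (k : Int)] from
      PySem.List.pyRange_one_succ_right (by omega), List.foldl_append]
    simp only [List.foldl_cons, List.foldl_nil]
    exact pvP_step ht hr hrt (by omega) (by push_cast at hk; omega) (ih hk')

theorem pvP_shift {t r : Int} {dp : List (List Int)} (h : pvP t r (t + 1) dp) :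
    pvP t (r + 1) 1 dp := by
  obtain ⟨hsh, hval⟩ := h
  refine ⟨hsh, ?_⟩
  intro x y hx1 hxt hy1 hyt
  rw [hval x y hx1 hxt hy1 hyt,
      if_congr (by omega : (x < r ∨ (x = r ∧ y < t + 1)) ↔ (x < r + 1 ∨ (x = r + 1 ∧ y < 1)))
        rfl rfl]

theorem pvP_fill {t : Int} {dp : List (List Int)} (ht : 1 ≤ t) (h : pvP t 1 1 dp) :
    ∀ n : Nat, (n : Int) ≤ t →
      pvP t (1 + (n : Int)) 1 ((PySem.List.pyRange 1 (1 + (n : Int)) 1).foldl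
        (fun dp a => (PySem.List.pyRange 1 (t + 1) 1).foldl (fun dp b => pvStep dp a b) dp)
        dp) := by
  intro n
  induction n with
  | zero =>
    intro _
    rw [show ((0 : Nat) : Int) = 0 by rfl]
    rw [show PySem.List.pyRange 1 (1 + (0 : Int)) 1 = [] from
      PySem.List.pyRange_one_eq_nil (by omega)]
    simpa using h
  | succ k ih =>
    intro hk
    have hk' : (k : Int) ≤ t := by push_cast at hk ⊢; omega
    have hcast : 1 + ((k + 1 : Nat) : Int) = (1 + (k : Int)) + 1 := by push_cast; ring
    rw [hcast, show PySem.List.pyRange 1 ((1 + (k : Int)) + 1) 1 =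
        PySem.List.pyRange 1 (1 + (k : Int)) 1 ++ [1 + (k : Int)] from
      PySem.List.pyRange_one_succ_right (by omega), List.foldl_append]
    simp only [List.foldl_cons, List.foldl_nil]
    have hrow := pvP_row ht (by omega) (by push_cast at hk; omega) (ih hk') t.toNat
      (by omega)
    rw [show (1 + (t.toNat : Int)) = t + 1 by omega] at hrow
    exact pvP_shift hrow

theorem pvTable_eq {t : Int} (ht : 1 ≤ t) :
    ∀ x y : Int, 1 ≤ x → x ≤ t → 1 ≤ y → y ≤ t →
      pvGet2 (pvTable t) x y = pvD x.toNat y.toNat := by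
  have h := pvP_fill ht (pvP_init t ht) t.toNat (by omega)
  rw [show (1 + (t.toNat : Int)) = t + 1 by omega] at h
  intro x y hx1 hxt hy1 hyt
  unfold pvTable
  obtain ⟨_, hval⟩ := h
  rw [hval x y hx1 hxt hy1 hyt, if_pos (by omega)]

theorem pvTable_symm {t : Int} (ht : 1 ≤ t) (a b : Int)
    (ha1 : 1 ≤ a) (hat : a ≤ t) (hb1 : 1 ≤ b) (hbt : b ≤ t) :
    pvGet2 (pvTable t) a b = pvGet2 (pvTable t) b a := by
  rw [pvTable_eq ht a b ha1 hat hb1 hbt, pvTable_eq ht b a hb1 hbt ha1 hat, pvD_symm]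

-- list-sum helpers
theorem pvSum_map_add {α : Type} (l : List α) (f g : α → Int) :
    (l.map fun x => f x + g x).sum = (l.map f).sum + (l.map g).sum := by
  induction l with
  | nil => simp
  | cons x l ih => simp [ih]; ring

theorem pvDouble_sum_comm {α : Type} (la lb : List α) (g : α → α → Int) :
    (la.map fun a => (lb.map (g a)).sum).sum = (lb.map fun b => (la.map fun a => g a b).sum).sum := by
  induction la with
  | nil => simp
  | cons x l ih =>
    simp only [List.map_cons, List.sum_cons, ih, ← pvSum_map_add]

-- the summation loop: bounds and value modulo pvM
theorem pvExp_inner (t a : Int) (dp : List (List Int)) (l : List Int) :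
    ∀ e : Int, 0 ≤ e → e < pvM →
      (0 ≤ l.foldl (fun exp b =>
          if a + b = t then pvModAdd exp (pvModMul (a - b) (pvGet2 dp a b)) else exp) e ∧
       l.foldl (fun exp b =>
          if a + b = t then pvModAdd exp (pvModMul (a - b) (pvGet2 dp a b)) else exp) e < pvM ∧
       pvM ∣ l.foldl (fun exp b =>
          if a + b = t then pvModAdd exp (pvModMul (a - b) (pvGet2 dp a b)) else exp) e -
        (e + (l.map fun b =>
          if a + b = t then pvModMul (a - b) (pvGet2 dp a b) else 0).sum)) := by
  induction l with
  | nil => intro e he0 heM; exact ⟨he0, heM, by simp⟩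
  | cons b l ih =>
    intro e he0 heM
    simp only [List.foldl_cons, List.map_cons, List.sum_cons]
    by_cases hc : a + b = t
    · rw [if_pos hc, if_pos hc]
      obtain ⟨h1, h2, h3⟩ := ih (pvModAdd e (pvModMul (a - b) (pvGet2 dp a b)))
        (pvModAdd_bounds _ _).1 (pvModAdd_bounds _ _).2
      refine ⟨h1, h2, ?_⟩
      have h4 : pvM ∣ pvModAdd e (pvModMul (a - b) (pvGet2 dp a b)) -
          (e + pvModMul (a - b) (pvGet2 dp a b)) := by
        rw [pvModAdd_eq]
        exact pvDvd_emod_sub _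
      have := dvd_add h3 h4
      convert this using 1
      ring
    · rw [if_neg hc, if_neg hc]
      obtain ⟨h1, h2, h3⟩ := ih e he0 heM
      refine ⟨h1, h2, ?_⟩
      convert h3 using 1
      ring

theorem pvExp_outer (t : Int) (dp : List (List Int)) (lb : List Int) (la : List Int) :
    ∀ e : Int, 0 ≤ e → e < pvM →
      (0 ≤ la.foldl (fun exp a => lb.foldl (fun exp b =>
          if a + b = t then pvModAdd exp (pvModMul (a - b) (pvGet2 dp a b)) else exp) exp) e ∧
       la.foldl (fun exp a => lb.foldl (fun exp b =>
          if a + b = t then pvModAdd exp (pvModMul (a - b) (pvGet2 dp a b)) else exp) exp) e < pvM ∧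
       pvM ∣ la.foldl (fun exp a => lb.foldl (fun exp b =>
          if a + b = t then pvModAdd exp (pvModMul (a - b) (pvGet2 dp a b)) else exp) exp) e -
        (e + (la.map fun a => (lb.map fun b =>
          if a + b = t then pvModMul (a - b) (pvGet2 dp a b) else 0).sum).sum)) := by
  induction la with
  | nil => intro e he0 heM; exact ⟨he0, heM, by simp⟩
  | cons a la ih =>
    intro e he0 heM
    simp only [List.foldl_cons, List.map_cons, List.sum_cons]
    obtain ⟨g1, g2, g3⟩ := pvExp_inner t a dp lb e he0 heM
    obtain ⟨h1, h2, h3⟩ := ih _ g1 g2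
    refine ⟨h1, h2, ?_⟩
    have := dvd_add h3 g3
    convert this using 1
    ring

-- the total antisymmetric sum is divisible by pvM
theorem pvSum_dvd {t : Int} (ht : 1 ≤ t) :
    pvM ∣ ((PySem.List.pyRange 1 (t + 1) 1).map fun a =>
      ((PySem.List.pyRange 1 (t + 1) 1).map fun b =>
        if a + b = t then pvModMul (a - b) (pvGet2 (pvTable t) a b) else 0).sum).sum := by
  set l := PySem.List.pyRange 1 (t + 1) 1 with hl
  set g : Int → Int → Int := fun a b =>
    if a + b = t then pvModMul (a - b) (pvGet2 (pvTable t) a b) else 0 with hg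
  have hpair : ∀ a ∈ l, ∀ b ∈ l, pvM ∣ g a b + g b a := by
    intro a ha b hb
    have ha' := (PySem.List.mem_pyRange_one.mp (hl ▸ ha))
    have hb' := (PySem.List.mem_pyRange_one.mp (hl ▸ hb))
    simp only [hg]
    by_cases hc : a + b = t
    · rw [if_pos hc, if_pos (by omega)]
      rw [pvModMul_eq, pvModMul_eq,
          pvTable_symm ht b a (by omega) (by omega) (by omega) (by omega)]
      have h1 := pvDvd_emod_sub ((a - b) * pvGet2 (pvTable t) a b)
      have h2 := pvDvd_emod_sub ((b - a) * pvGet2 (pvTable t) a b)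
      have h3 := dvd_add h1 h2
      convert h3 using 1
      ring
    · rw [if_neg hc, if_neg (by omega)]
      simp
  have hdvdT : pvM ∣ (l.map fun a => (l.map fun b => g a b + g b a).sum).sum := by
    apply List.dvd_sum
    intro x hx
    obtain ⟨a, ha, rfl⟩ := List.mem_map.mp hx
    apply List.dvd_sum
    intro y hy
    obtain ⟨b, hb, rfl⟩ := List.mem_map.mp hy
    exact hpair a ha b hb
  have hT2 : (l.map fun a => (l.map fun b => g a b + g b a).sum).sum =
      (l.map fun a => ((l.map (g a)).sum + (l.map fun b => g b a).sum)).sum := by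
    congr 1
    exact List.map_congr_left (fun a _ => pvSum_map_add l (g a) (fun b => g b a))
  rw [hT2, pvSum_map_add l (fun a => (l.map (g a)).sum) (fun a => (l.map fun b => g b a).sum)]
    at hdvdT
  have hswap := pvDouble_sum_comm l l g
  rw [← hswap] at hdvdT
  have htwo : pvM ∣ 2 * (l.map fun a => (l.map (g a)).sum).sum := by
    rwa [two_mul]
  have hco : IsCoprime (pvM) (2 : Int) := by
    rw [Int.isCoprime_iff_gcd_eq_one]
    decide
  exact hco.dvd_of_dvd_mul_left htwo

-- ===== VERDICT (by name: the statement is the Claim_ definition above) =====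
theorem calc_expectation_spec : Claim_equal_calc_expectation := by
  intro t _ hpre
  unfold Spec_calc_expectation calc_expectation_alt
  have ht : 1 ≤ t := hpre
  show (PySem.List.pyRange 1 (t + 1) 1).foldl
      (fun exp a => (PySem.List.pyRange 1 (t + 1) 1).foldl
        (fun exp b =>
          if a + b = t then pvModAdd exp (pvModMul (a - b) (pvGet2 (pvTable t) a b)) else exp)
        exp) 0 = 0
  obtain ⟨h1, h2, h3⟩ := pvExp_outer t (pvTable t) (PySem.List.pyRange 1 (t + 1) 1)
    (PySem.List.pyRange 1 (t + 1) 1) 0 le_rfl pvM_pos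
  have hS := pvSum_dvd ht
  have hdvd : pvM ∣ (PySem.List.pyRange 1 (t + 1) 1).foldl
      (fun exp a => (PySem.List.pyRange 1 (t + 1) 1).foldl
        (fun exp b =>
          if a + b = t then pvModAdd exp (pvModMul (a - b) (pvGet2 (pvTable t) a b)) else exp)
        exp) 0 := by
    have := dvd_add h3 hS
    convert this using 1
    ring
  obtain ⟨k, hk⟩ := hdvd
  have hMpos := pvM_pos
  rw [hk] at h1 h2 ⊢
  have hk0 : k = 0 := by
    by_contra hne
    rcases lt_or_gt_of_ne hne with hlt | hgt
    · nlinarith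
    · nlinarith
  rw [hk0, mul_zero]
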